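-- pv_equiv track=rewrite | github.com/rmacedo1/EECS337_GG2015 | Category.py | splitRecursive
-- ===== SOURCE A (Python) =====
-- def splitRecursive(str, splits):
-- 	splitStrs = [];
-- 	for s in splits:
-- 		splitStrs.append(str.split(s));
-- 	for l in splitStrs:
-- 		if len(l) > 1:
-- 			try:
-- 				splits.remove(",")
-- 			except ValueError:
-- 				pass
-- 			return [l[0]]+ splitRecursive(l[1], splits);
-- 	return [str];
-- ===== SOURCE B (Python) =====
-- def splitRecursive(str, splits):
--     out = []
--     cur = str
--     while True:
--         sep = next((s for s in splits if s in cur), None)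
--         if sep is None:
--             out.append(cur)
--             return out
--         if "," in splits:
--             splits.remove(",")
--         parts = cur.split(sep)
--         out.append(parts[0])
--         cur = parts[1]
-- ===== Notes on version B (the rewrite author's own statement) =====
-- stated objective: simpler
-- what changed: Replaced A's recursion that materializes the full split of the remaining string by EVERY delimiter at each level (and rebuilds the result by repeated list concatenation) with an iterative while-loop over an accumulator that finds the first delimiter occurring as a substring and performs a single split per iteration.
import Mathlib
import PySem

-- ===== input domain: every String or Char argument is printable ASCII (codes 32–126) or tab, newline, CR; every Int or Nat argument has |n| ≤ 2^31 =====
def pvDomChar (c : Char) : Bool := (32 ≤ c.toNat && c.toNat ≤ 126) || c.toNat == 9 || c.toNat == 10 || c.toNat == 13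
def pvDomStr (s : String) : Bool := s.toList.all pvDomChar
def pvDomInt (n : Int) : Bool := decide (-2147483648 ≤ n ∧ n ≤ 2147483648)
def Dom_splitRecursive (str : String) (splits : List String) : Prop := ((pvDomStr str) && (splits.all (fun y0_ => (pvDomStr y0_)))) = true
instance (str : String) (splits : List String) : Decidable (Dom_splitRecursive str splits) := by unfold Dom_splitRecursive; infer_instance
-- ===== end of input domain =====

-- B replaces A's recursion (which splits by EVERY delimiter at each level) by an iterative
-- accumulator loop that finds the first delimiter occurring as a substring and splits once.
-- Both programs mutate `splits` (remove ","); the theorems are about the RETURN value only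
-- (B performs the same mutation in Python).

-- ===== PORT A =====
-- A's recursion, guarded by fuel; each recursive call strictly shortens the string, so
-- fuel = length + 1 is never exhausted on inputs where the Python returns.
def splitRecA (fuel : Nat) (str : String) (splits : List String) : List String :=
  match fuel with
  | 0 => [str]          -- fuel guard only
  | Nat.succ f =>
    -- splitStrs = [str.split(s) for s in splits]; `getD []` stands for the ValueError of
    -- split("") (excluded by Pre_, where A raises)
    let splitStrs := splits.map (fun s => (PySem.Str.split? str s).getD [])
    -- for l in splitStrs: if len(l) > 1: … return …;  return [str]
    match splitStrs.find? (fun l => decide (1 < l.length)) with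
    | none => [str]
    | some l =>
      -- try: splits.remove(","); except ValueError: pass
      let splits' := (PySem.List.remove? splits ",").getD splits
      (l.headD "") :: splitRecA f ((l[1]?).getD "") splits'

def splitRecursive (str : String) (splits : List String) : List String :=
  splitRecA (str.toList.length + 1) str splits

-- ===== PORT B =====
-- B's while-loop: accumulator `out`, current string `cur`; same fuel guard.
def splitRecB (fuel : Nat) (cur : String) (splits : List String) (out : List String) : List String :=
  match fuel with
  | 0 => out ++ [cur]   -- fuel guard only
  | Nat.succ f =>
    -- sep = next((s for s in splits if s in cur), None)
    match splits.find? (fun s => PySem.Str.isIn s cur) with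
    | none => out ++ [cur]
    | some sep =>
      -- if "," in splits: splits.remove(",")
      let splits' := if splits.contains "," then (PySem.List.remove? splits ",").getD splits else splits
      let parts := (PySem.Str.split? cur sep).getD []
      splitRecB f ((parts[1]?).getD "") splits' (out ++ [parts.headD ""])

def splitRecursive_alt (str : String) (splits : List String) : List String :=
  splitRecB (str.toList.length + 1) str splits []

-- ===== PRECONDITION & SPEC =====
-- Pre_ excludes exactly the inputs where Python A raises: an empty separator in `splits`
-- makes str.split("") raise ValueError (B raises there too).
def Pre_splitRecursive (str : String) (splits : List String) : Prop := "" ∉ splits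
instance (str : String) (splits : List String) : Decidable (Pre_splitRecursive str splits) := by
  unfold Pre_splitRecursive; infer_instance

def pvWitness_splitRecursive : String × List String := ("a,b-c", [",", "-"])

def Spec_splitRecursive (str : String) (splits : List String) (out : List String) : Prop := out = splitRecursive_alt str splits
instance (str : String) (splits : List String) (out : List String) : Decidable (Spec_splitRecursive str splits out) := by unfold Spec_splitRecursive; infer_instance

-- ===== CLAIM (what is proved, stated in full; the proofs are below) =====
def Claim_equal_splitRecursive : Prop := ∀ (str : String) (splits : List String), Dom_splitRecursive str splits → Pre_splitRecursive str splits → Spec_splitRecursive str splits (splitRecursive str splits)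

-- ===== LEMMAS AND PROOFS =====

-- splitOn.go always returns at least one piece more than acc
lemma go_len_lb (sep : List Char) : ∀ (fuel : Nat) (l cur : List Char) (acc : List (List Char)),
    acc.length + 1 ≤ (PySem.Chars.splitOn.go sep fuel l cur acc).length := by
  intro fuel
  induction fuel with
  | zero => intro l cur acc; simp [PySem.Chars.splitOn.go]
  | succ f ih =>
    intro l cur acc
    cases l with
    | nil => simp [PySem.Chars.splitOn.go]
    | cons c rest =>
      simp only [PySem.Chars.splitOn.go]
      split
      · have := ih (List.drop sep.length (c :: rest)) [] (cur.reverse :: acc)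
        simp at this; omega
      · exact ih rest (c :: cur) acc

-- if sep does not occur, go returns the single remaining piece
lemma go_not_infix (sep : List Char) : ∀ (fuel : Nat) (l cur : List Char) (acc : List (List Char)),
    ¬ sep <:+: l →
    PySem.Chars.splitOn.go sep fuel l cur acc = ((cur.reverse ++ l) :: acc).reverse := by
  intro fuel
  induction fuel with
  | zero => intro l cur acc _; simp [PySem.Chars.splitOn.go]
  | succ f ih =>
    intro l cur acc h
    cases l with
    | nil => simp [PySem.Chars.splitOn.go]
    | cons c rest =>
      have hpre : sep.isPrefixOf (c :: rest) = false := by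
        by_contra hx
        have hx' : sep.isPrefixOf (c :: rest) = true := by simpa using hx
        exact h (List.isPrefixOf_iff_prefix.mp hx').isInfix
      simp only [PySem.Chars.splitOn.go, hpre]
      have hrest : ¬ sep <:+: rest := fun hx => h (hx.trans (List.suffix_cons c rest).isInfix)
      rw [ih rest (c :: cur) acc hrest]
      simp
lemma go_infix (sep : List Char) (hsep : sep ≠ []) :
    ∀ (fuel : Nat) (l cur : List Char) (acc : List (List Char)),
    sep <:+: l → l.length < fuel →
    acc.length + 2 ≤ (PySem.Chars.splitOn.go sep fuel l cur acc).length := by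
  intro fuel
  induction fuel with
  | zero => intro l cur acc _ h; omega
  | succ f ih =>
    intro l cur acc hinf hlen
    cases l with
    | nil => exact absurd (List.eq_nil_of_infix_nil hinf) hsep
    | cons c rest =>
      simp only [PySem.Chars.splitOn.go]
      split
      · have := go_len_lb sep f (List.drop sep.length (c :: rest)) [] (cur.reverse :: acc)
        simp at this; omega
      · rename_i hpre
        have hinf' : sep <:+: rest := by
          rcases (List.infix_cons_iff).mp hinf with h1 | h1
          · exact absurd (List.isPrefixOf_iff_prefix.mpr h1) (by simpa using hpre)
          · exact h1
        have : rest.length < f := by simp at hlen; omega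
        exact ih rest (c :: cur) acc hinf' this

-- the predicate A evaluates (len(str.split(s)) > 1) equals the predicate B evaluates (s in str),
-- for any non-empty separator s
lemma pred_eq (cur s : String) (hs : s ≠ "") :
    decide (1 < ((PySem.Str.split? cur s).getD []).length) = PySem.Str.isIn s cur := by
  have hsl : s.toList ≠ [] := by
    intro h; apply hs; cases s with | _ d => cases d with | _ l => simp at h; simp [h]
  have hsplit : PySem.Str.split? cur s =
      some ((PySem.Chars.splitOn cur.toList s.toList).map String.ofList) := by
    simp [PySem.Str.split?, PySem.Chars.split?, hsl]
  rw [hsplit]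
  by_cases hinf : s.toList <:+: cur.toList
  · have h2 := go_infix s.toList hsl (cur.toList.length + 1) cur.toList [] [] hinf (by omega)
    have : PySem.Str.isIn s cur = true := by
      simp [PySem.Str.isIn]
      exact (PySem.Chars.isIn_iff_infix _ _).mpr hinf
    rw [this]
    simp [PySem.Chars.splitOn] at h2 ⊢
    omega
  · have h1 := go_not_infix s.toList (cur.toList.length + 1) cur.toList [] [] hinf
    have : PySem.Str.isIn s cur = false := by
      cases hb : PySem.Chars.isIn s.toList cur.toList
      · simp [PySem.Str.isIn, hb]
      · exact absurd ((PySem.Chars.isIn_iff_infix _ _).mp hb) hinf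
    rw [this]
    simp [PySem.Chars.splitOn] at h1 ⊢
    simp [h1]

lemma find?_congr' {α : Type} (p q : α → Bool) (l : List α) (h : ∀ x ∈ l, p x = q x) :
    l.find? p = l.find? q := by
  induction l with
  | nil => rfl
  | cons a t ih =>
    have ha := h a (by simp)
    simp only [List.find?]
    rw [ha]
    cases hq : q a
    · simp; exact ih (fun x hx => h x (by simp [hx]))
    · simp

-- the two ways of performing splits.remove(",") agree
lemma removes_eq (splits : List String) :
    (if splits.contains "," then (PySem.List.remove? splits ",").getD splits else splits)
      = (PySem.List.remove? splits ",").getD splits := by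
  by_cases h : "," ∈ splits
  · simp [h]
  · have : PySem.List.remove? splits "," = none := (PySem.List.remove?_eq_none_iff _ _).mpr h
    simp [this, h]

lemma not_mem_remove (splits : List String) (h : "" ∉ splits) :
    "" ∉ (PySem.List.remove? splits ",").getD splits := by
  by_cases hm : "," ∈ splits
  · rw [PySem.List.remove?_eq_some_erase _ _ hm]
    intro hx
    simp only [Option.getD_some] at hx
    exact h (List.mem_of_mem_erase hx)
  · have : PySem.List.remove? splits "," = none := (PySem.List.remove?_eq_none_iff _ _).mpr hm
    simpa [this] using h

-- the main loop correspondence: B's loop = accumulator ++ A's recursion, for equal fuel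
lemma loop_eq : ∀ (fuel : Nat) (cur : String) (splits : List String) (out : List String),
    "" ∉ splits →
    splitRecB fuel cur splits out = out ++ splitRecA fuel cur splits := by
  intro fuel
  induction fuel with
  | zero => intro cur splits out _; simp [splitRecA, splitRecB]
  | succ f ih =>
    intro cur splits out hsp
    have hmap : (splits.map (fun s => (PySem.Str.split? cur s).getD [])).find?
          (fun l => decide (1 < l.length))
        = (splits.find? (fun s => decide (1 < ((PySem.Str.split? cur s).getD []).length))).map
            (fun s => (PySem.Str.split? cur s).getD []) := by
      rw [List.find?_map]; rfl
    have hcong : splits.find? (fun s => decide (1 < ((PySem.Str.split? cur s).getD []).length))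
        = splits.find? (fun s => PySem.Str.isIn s cur) :=
      find?_congr' _ _ _ (fun s hs => pred_eq cur s (fun h => hsp (h ▸ hs)))
    simp only [splitRecA, splitRecB, hmap, hcong, removes_eq]
    cases hfind : splits.find? (fun s => PySem.Str.isIn s cur) with
    | none => simp
    | some sep =>
      simp only [Option.map_some]
      rw [ih _ _ _ (not_mem_remove splits hsp)]
      simp

-- ===== VERDICT (by name: the statement is the Claim_ definition above) =====
theorem splitRecursive_spec : Claim_equal_splitRecursive := by
  intro str splits _ hpre
  unfold Spec_splitRecursive splitRecursive splitRecursive_alt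
  rw [loop_eq _ _ _ _ hpre]
  simp
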